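-- pv_equiv track=rewrite | github.com/tsangel/dicomsdl | misc/charset/build_tables.py | table_unicode_to_singlebyte
-- ===== SOURCE A (Python) =====
-- FORMAT8 = """
-- static const uint8_t {name}[{size}] = {{
-- {code}
-- }};"""
--
-- class CCodeBuilder(object):
--     def __init__(self, indent=4, margin=80):
--         self.rows = []
--         self.row = []
--         self.indent = ' '*indent
--         self.margin = margin
--         self.nitems = 0
--
--     def addRow(self, s):
--         # add a row (such as comment)
--         # ex) stmt.append("// page %d"%(pageno))
--         self.flush()
--         self.rows.append(s)
--
--     def addItem(self, s):
--         # add an item to current row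
--         # ex) stmt.addItem('%d,'%(number))
--         tmp = ''.join(self.row)
--         if len(self.indent + tmp + s) > self.margin:
--             self.flush()
--         self.row.append(s)
--         self.nitems += 1
--
--     def flush(self):
--         # append all items in row to rows,
--         # then empty row.
--         if self.row:
--             lastline = ''.join(self.row)
--             self.rows.append(lastline)
--             self.row = []
--
--     def joinRows(self):
--         # retuen all rows in one string
--         self.flush()
--         # remove trailing comma
--         self.rows[-1] = self.rows[-1].rstrip()[:-1]
--         return '\n'.join(
--             self.indent + r for r in self.rows)
--
--     def numberOfItems(self):
--         return self.nitems
--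
-- def table_unicode_to_singlebyte(codec, u2m, ucfrom, ucto):
--     """ """
--     code = CCodeBuilder()
--     varname = 'map_unicode_to_%s_%04x_%04x'%(codec, ucfrom, ucto - 1)
--
--     for i in range(ucfrom, ucto):
--         if i % 16 == 0:
--             code.addRow('/* U+%04X - U+%04X */'%(i, i+15))
--         if i in u2m:
--             code.addItem('0x%02x, '%(u2m[i]))
--         else:
--             code.addItem('0x00, ')
--         if i % 8 == 7:
--             code.flush()
--
--     return FORMAT8.format(name=varname, size=code.numberOfItems(),
--                                 code=code.joinRows())
-- ===== SOURCE B (Python) =====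
-- FORMAT8 = """
-- static const uint8_t {name}[{size}] = {{
-- {code}
-- }};"""
--
-- def table_unicode_to_singlebyte(codec, u2m, ucfrom, ucto):
--     """ """
--     ind = ' ' * 4
--
--     def wrap(tokens):
--         # greedy wrap of a block's tokens into lines of at most 80 columns
--         # (the first token of a line is always taken, as in the original).
--         out, cur = [], tokens[0]
--         for t in tokens[1:]:
--             if len(ind + cur + t) > 80:
--                 out.append(cur)
--                 cur = t
--             else:
--                 cur += t
--         out.append(cur)
--         return out
--
--     lines = []
--     start = ucfrom
--     while start < ucto:
--         end = min(ucto, (start // 8 + 1) * 8)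
--         if start % 16 == 0:
--             lines.append('/* U+%04X - U+%04X */' % (start, start + 15))
--         lines.extend(wrap(['0x%02x, ' % u2m[i] if i in u2m else '0x00, '
--                            for i in range(start, end)]))
--         start = end
--     lines[-1] = lines[-1].rstrip()[:-1]
--     varname = 'map_unicode_to_%s_%04x_%04x' % (codec, ucfrom, ucto - 1)
--     return FORMAT8.format(name=varname, size=ucto - ucfrom,
--                           code='\n'.join(ind + l for l in lines))
-- ===== Notes on version B (the rewrite author's own statement) =====
-- stated objective: simpler
-- what changed: B replaces A's streaming CCodeBuilder pass (one state machine over every index with flush calls) by a two-level block decomposition: an outer loop over 8-aligned blocks of the range, each block's token list built first and then greedily wrapped by a separate wrap() helper, with the size computed as the closed form ucto - ucfrom instead of counting items.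
import Mathlib
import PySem

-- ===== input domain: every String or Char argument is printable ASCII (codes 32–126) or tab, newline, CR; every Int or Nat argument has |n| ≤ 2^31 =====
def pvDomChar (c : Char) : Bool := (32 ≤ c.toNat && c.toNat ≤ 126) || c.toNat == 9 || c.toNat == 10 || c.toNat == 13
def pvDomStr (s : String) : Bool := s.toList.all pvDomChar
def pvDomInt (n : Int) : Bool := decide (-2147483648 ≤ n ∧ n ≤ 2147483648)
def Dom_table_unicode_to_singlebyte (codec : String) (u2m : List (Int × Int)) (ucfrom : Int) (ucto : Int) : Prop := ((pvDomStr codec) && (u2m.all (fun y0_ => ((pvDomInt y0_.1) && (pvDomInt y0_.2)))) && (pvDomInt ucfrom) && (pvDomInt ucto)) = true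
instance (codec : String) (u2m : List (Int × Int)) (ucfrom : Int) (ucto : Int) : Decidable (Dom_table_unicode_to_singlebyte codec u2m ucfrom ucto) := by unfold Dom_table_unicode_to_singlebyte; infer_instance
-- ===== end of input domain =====

-- B replaces A's streaming CCodeBuilder pass by a two-level block decomposition (outer
-- recursion over 8-aligned blocks, each block's token list wrapped by a separate greedy
-- wrap helper) and computes the size as the closed form ucto - ucfrom (objective: simpler).
-- Return-value equivalence only; neither program mutates its arguments.

-- Python's '%04x' / '%04X' / '%02x' formatting of an int (shared formatting primitive):
-- lowercase (or uppercase) hex of |n|, '-' in front for negatives, zero-padded to the width.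
def pvHexPad (upper : Bool) (w : Int) (n : Int) : String :=
  let ds := Nat.toDigits 16 n.natAbs
  let ds := if upper then ds.map PySem.Chars.upperChar else ds
  String.ofList (PySem.Chars.zfill ((if n < 0 then ['-'] else []) ++ ds) w)

-- '/* U+%04X - U+%04X */' % (i, i+15)  (same expression in both Pythons)
def pvComment (i : Int) : String :=
  "/* U+" ++ pvHexPad true 4 i ++ " - U+" ++ pvHexPad true 4 (i + 15) ++ " */"

-- "'0x%02x, ' % u2m[i] if i in u2m else '0x00, '" (same expression in both Pythons)
def pvToken (u2m : List (Int × Int)) (i : Int) : String :=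
  match PySem.Dict.get? ⟨u2m⟩ i with
  | some v => "0x" ++ pvHexPad false 2 v ++ ", "
  | none => "0x00, "

-- ===== PORT A =====
structure PvBuilder where
  rows : List String
  row : List String
  nitems : Int
deriving Repr, DecidableEq

def pvA_flush (s : PvBuilder) : PvBuilder :=
  if s.row = [] then s
  else { s with rows := s.rows ++ [PySem.Str.join "" s.row], row := [] }

def pvA_addRow (s : PvBuilder) (line : String) : PvBuilder :=
  let s := pvA_flush s
  { s with rows := s.rows ++ [line] }

def pvA_addItem (s : PvBuilder) (x : String) : PvBuilder :=
  let tmp := PySem.Str.join "" s.row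
  let s := if 80 < PySem.Str.len ("    " ++ tmp ++ x) then pvA_flush s else s
  { s with row := s.row ++ [x], nitems := s.nitems + 1 }

def pvA_step (u2m : List (Int × Int)) (s : PvBuilder) (i : Int) : PvBuilder :=
  let s := if PySem.Int.mod i 16 = 0 then pvA_addRow s (pvComment i) else s
  let s := pvA_addItem s (pvToken u2m i)
  if PySem.Int.mod i 8 = 7 then pvA_flush s else s

def pvA_joinRows (s : PvBuilder) : String :=
  let s := pvA_flush s
  let rows := PySem.List.pySetD s.rows (-1)
      (PySem.Str.slice (PySem.Str.rstrip (PySem.List.pyGetD s.rows (-1) "")) none (some (-1)))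
  PySem.Str.join "\n" (rows.map (fun r => "    " ++ r))

def table_unicode_to_singlebyte (codec : String) (u2m : List (Int × Int)) (ucfrom : Int) (ucto : Int) : String :=
  let varname := "map_unicode_to_" ++ codec ++ "_" ++ pvHexPad false 4 ucfrom ++ "_" ++ pvHexPad false 4 (ucto - 1)
  let code := (PySem.List.pyRange ucfrom ucto 1).foldl (pvA_step u2m) ⟨[], [], 0⟩
  "\nstatic const uint8_t " ++ varname ++ "[" ++ PySem.Int.toStr code.nitems ++ "] = {\n"
    ++ pvA_joinRows code ++ "\n};"

-- ===== PORT B =====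
-- the (0 or 1) comment lines a block starting at s contributes
def pvCmt (s : Int) : List String :=
  if PySem.Int.mod s 16 = 0 then [pvComment s] else []

-- one step of Source B's wrap(): state = (finished lines, current line)
def pvWrapStep (st : List String × String) (t : String) : List String × String :=
  if 80 < PySem.Str.len ("    " ++ st.2 ++ t) then (st.1 ++ [st.2], t) else (st.1, st.2 ++ t)

-- Source B's wrap(tokens); blocks are never empty, so the [] case is unreachable
def pvWrap (ts : List String) : List String :=
  match ts with
  | [] => []
  | t :: rest => let p := rest.foldl pvWrapStep ([], t); p.1 ++ [p.2]

-- used by pvB_blocks' termination proof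
lemma pv_fd (s : Int) :
    PySem.Int.floordiv s 8 * 8 ≤ s ∧ s < (PySem.Int.floordiv s 8 + 1) * 8 := by
  rw [PySem.Int.floordiv_eq_ediv_of_pos (by norm_num)]
  omega

-- Source B's while loop: one 8-aligned block per iteration
def pvB_blocks (u2m : List (Int × Int)) (start ucto : Int) : List String :=
  if h : start < ucto then
    let e := min ucto ((PySem.Int.floordiv start 8 + 1) * 8)
    pvCmt start ++ pvWrap ((PySem.List.pyRange start e 1).map (pvToken u2m))
      ++ pvB_blocks u2m e ucto
  else []
termination_by (ucto - start).toNat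
decreasing_by
  have := pv_fd start
  omega

def table_unicode_to_singlebyte_alt (codec : String) (u2m : List (Int × Int)) (ucfrom : Int) (ucto : Int) : String :=
  let varname := "map_unicode_to_" ++ codec ++ "_" ++ pvHexPad false 4 ucfrom ++ "_" ++ pvHexPad false 4 (ucto - 1)
  let lines := pvB_blocks u2m ucfrom ucto
  let lines := PySem.List.pySetD lines (-1)
      (PySem.Str.slice (PySem.Str.rstrip (PySem.List.pyGetD lines (-1) "")) none (some (-1)))
  "\nstatic const uint8_t " ++ varname ++ "[" ++ PySem.Int.toStr (ucto - ucfrom) ++ "] = {\n"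
    ++ PySem.Str.join "\n" (lines.map (fun r => "    " ++ r)) ++ "\n};"

-- ===== PRECONDITION & SPEC =====
-- Pre_ excludes exactly the empty ranges (ucto ≤ ucfrom): there A raises IndexError on
-- self.rows[-1] (and B likewise on lines[-1]), so neither Python returns a value.
def Pre_table_unicode_to_singlebyte (codec : String) (u2m : List (Int × Int)) (ucfrom : Int) (ucto : Int) : Prop :=
  ucfrom < ucto
instance (codec : String) (u2m : List (Int × Int)) (ucfrom : Int) (ucto : Int) : Decidable (Pre_table_unicode_to_singlebyte codec u2m ucfrom ucto) := by unfold Pre_table_unicode_to_singlebyte; infer_instance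

def pvWitness_table_unicode_to_singlebyte : String × (List (Int × Int)) × Int × Int :=
  ("latin1", [(1, 65), (2, 66)], 0, 4)

def Spec_table_unicode_to_singlebyte (codec : String) (u2m : List (Int × Int)) (ucfrom : Int) (ucto : Int) (out : String) : Prop := out = table_unicode_to_singlebyte_alt codec u2m ucfrom ucto
instance (codec : String) (u2m : List (Int × Int)) (ucfrom : Int) (ucto : Int) (out : String) : Decidable (Spec_table_unicode_to_singlebyte codec u2m ucfrom ucto out) := by unfold Spec_table_unicode_to_singlebyte; infer_instance

-- ===== CLAIM (what is proved, stated in full; the proofs are below) =====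
def Claim_equal_table_unicode_to_singlebyte : Prop := ∀ (codec : String) (u2m : List (Int × Int)) (ucfrom : Int) (ucto : Int), Dom_table_unicode_to_singlebyte codec u2m ucfrom ucto → Pre_table_unicode_to_singlebyte codec u2m ucfrom ucto → Spec_table_unicode_to_singlebyte codec u2m ucfrom ucto (table_unicode_to_singlebyte codec u2m ucfrom ucto)

-- ===== LEMMAS AND PROOFS =====

lemma pv_cjoin (ll : List (List Char)) : PySem.Chars.join [] ll = ll.flatten := by
  induction ll with
  | nil => rfl
  | cons x t ih => cases t with
    | nil => simp [PySem.Chars.join, List.intercalate]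
    | cons y s => simp_all [PySem.Chars.join, List.intercalate]

lemma pv_join_append (l : List String) (x : String) :
    PySem.Str.join "" (l ++ [x]) = PySem.Str.join "" l ++ x := by
  rw [← String.toList_inj]
  simp [pv_cjoin]

lemma pv_join_singleton (x : String) : PySem.Str.join "" [x] = x := by
  rw [← String.toList_inj]; simp [pv_cjoin]

-- arithmetic facts about an 8-aligned block [s, e), e ≤ (q+1)*8, q*8 ≤ s
lemma pv_mod16_ne (q s i : Int) (h1 : q * 8 ≤ s) (h2 : s < i) (h3 : i < (q + 1) * 8) :
    PySem.Int.mod i 16 ≠ 0 := by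
  rw [PySem.Int.mod_eq_emod_of_pos (by norm_num)]
  omega

lemma pv_mod7_iff (q s i : Int) (h1 : q * 8 ≤ s) (h2 : s ≤ i) (h3 : i < (q + 1) * 8) :
    PySem.Int.mod i 8 = 7 ↔ i + 1 = (q + 1) * 8 := by
  rw [PySem.Int.mod_eq_emod_of_pos (by norm_num)]
  omega

-- A's addItem on an empty row never flushes anything
lemma pv_addItem_nil (R : List String) (n : Int) (x : String) :
    pvA_addItem ⟨R, [], n⟩ x = ⟨R, [x], n + 1⟩ := by
  unfold pvA_addItem pvA_flush
  split_ifs <;> simp_all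

-- A's step at a block start (empty row)
lemma pv_step_start (u2m : List (Int × Int)) (R : List String) (n s : Int) :
    pvA_step u2m ⟨R, [], n⟩ s =
      if PySem.Int.mod s 8 = 7
      then ⟨R ++ pvCmt s ++ [pvToken u2m s], [], n + 1⟩
      else ⟨R ++ pvCmt s, [pvToken u2m s], n + 1⟩ := by
  unfold pvA_step pvCmt
  by_cases hc : PySem.Int.mod s 16 = 0 <;>
    simp only [hc, if_pos, if_neg, ite_true, ite_false, pvA_addRow, pvA_flush] <;>
    by_cases h7 : PySem.Int.mod s 8 = 7 <;>
    simp [h7, pv_addItem_nil, pvA_flush, pv_join_singleton]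


-- A's step at an interior index of an 8-block (nonempty row, no comment line)
lemma pv_step_mid (u2m : List (Int × Int)) (R row : List String) (n i : Int)
    (hrow : row ≠ []) (hc : ¬ PySem.Int.mod i 16 = 0) :
    pvA_step u2m ⟨R, row, n⟩ i =
      if PySem.Int.mod i 8 = 7 then
        pvA_flush (if 80 < PySem.Str.len ("    " ++ PySem.Str.join "" row ++ pvToken u2m i)
          then ⟨R ++ [PySem.Str.join "" row], [pvToken u2m i], n + 1⟩
          else ⟨R, row ++ [pvToken u2m i], n + 1⟩)
      else (if 80 < PySem.Str.len ("    " ++ PySem.Str.join "" row ++ pvToken u2m i)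
          then ⟨R ++ [PySem.Str.join "" row], [pvToken u2m i], n + 1⟩
          else ⟨R, row ++ [pvToken u2m i], n + 1⟩) := by
  unfold pvA_step pvA_addItem pvA_flush
  simp only [hc, ite_false, if_neg]
  split_ifs <;> simp_all

-- flush of a nonempty row
lemma pv_flush_ne (R row : List String) (n : Int) (hrow : row ≠ []) :
    pvA_flush ⟨R, row, n⟩ = ⟨R ++ [PySem.Str.join "" row], [], n⟩ := by
  unfold pvA_flush
  simp [hrow]

-- the inner block loop: A's addItem/flush stream over indices [i, e) agrees with
-- Source B's greedy wrap fold, carried from an arbitrary nonempty current row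
lemma pv_inner (u2m : List (Int × Int)) (ucto q e : Int) (B0 : List String) (s : Int)
    (hqs : q * 8 ≤ s) (hqe : e ≤ (q + 1) * 8) (heu : e ≤ ucto) :
    ∀ (k : Nat) (i : Int) (out row : List String) (n' : Int),
      s < i → i ≤ e → (e - i).toNat ≤ k → row ≠ [] → (i = e → e ≠ (q + 1) * 8) →
      ∃ row', row' ≠ [] ∧
        PySem.Str.join "" row' =
          (((PySem.List.pyRange i e 1).map (pvToken u2m)).foldl pvWrapStep
            (out, PySem.Str.join "" row)).2 ∧
        (PySem.List.pyRange i ucto 1).foldl (pvA_step u2m) ⟨B0 ++ out, row, n'⟩ =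
          (PySem.List.pyRange e ucto 1).foldl (pvA_step u2m)
            (if e = (q + 1) * 8
             then ⟨B0 ++ (((PySem.List.pyRange i e 1).map (pvToken u2m)).foldl pvWrapStep
                      (out, PySem.Str.join "" row)).1
                    ++ [(((PySem.List.pyRange i e 1).map (pvToken u2m)).foldl pvWrapStep
                      (out, PySem.Str.join "" row)).2], [], n' + (e - i)⟩
             else ⟨B0 ++ (((PySem.List.pyRange i e 1).map (pvToken u2m)).foldl pvWrapStep
                      (out, PySem.Str.join "" row)).1, row', n' + (e - i)⟩) := by
  intro k
  induction k with
  | zero =>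
    intro i out row n' hsi hie hk hrow hbase
    have hieq : i = e := by omega
    subst hieq
    refine ⟨row, hrow, ?_, ?_⟩
    · rw [PySem.List.pyRange_one_eq_nil (le_refl _)]; rfl
    · rw [PySem.List.pyRange_one_eq_nil (le_refl _), if_neg (hbase rfl)]
      have hn : n' + (i - i) = n' := by omega
      rw [hn]
      simp
  | succ m ih =>
    intro i out row n' hsi hie hk hrow hbase
    by_cases hieq : i = e
    · subst hieq
      refine ⟨row, hrow, ?_, ?_⟩
      · rw [PySem.List.pyRange_one_eq_nil (le_refl _)]; rfl
      · rw [PySem.List.pyRange_one_eq_nil (le_refl _), if_neg (hbase rfl)]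
        have hn : n' + (i - i) = n' := by omega
        rw [hn]
        simp
    · have hlt : i < e := by omega
      have hiu : i < ucto := by omega
      rw [PySem.List.pyRange_one_cons hiu, PySem.List.pyRange_one_cons hlt]
      simp only [List.foldl_cons, List.map_cons]
      have hc : ¬ PySem.Int.mod i 16 = 0 := pv_mod16_ne q s i hqs hsi (by omega)
      rw [pv_step_mid u2m (B0 ++ out) row n' i hrow hc]
      by_cases hm : 80 < PySem.Str.len ("    " ++ PySem.Str.join "" row ++ pvToken u2m i)
      · -- margin flush: a finished line is emitted, the token starts a new row
        have hws : pvWrapStep (out, PySem.Str.join "" row) (pvToken u2m i)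
            = (out ++ [PySem.Str.join "" row], PySem.Str.join "" [pvToken u2m i]) := by
          unfold pvWrapStep
          rw [if_pos hm, pv_join_singleton]
        rw [hws]
        simp only [if_pos hm]
        by_cases h7 : PySem.Int.mod i 8 = 7
        · have he8 : i + 1 = (q + 1) * 8 := (pv_mod7_iff q s i hqs (by omega) (by omega)).mp h7
          have hee : e = i + 1 := by omega
          rw [if_pos h7, pv_flush_ne _ _ _ (by simp)]
          subst hee
          refine ⟨[pvToken u2m i], by simp, ?_, ?_⟩
          · rw [PySem.List.pyRange_one_eq_nil (le_refl _)]; rfl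
          · rw [PySem.List.pyRange_one_eq_nil (le_refl _), if_pos he8]
            have hn : n' + (i + 1 - i) = n' + 1 := by omega
            rw [hn]
            simp
        · rw [if_neg h7]
          have hb' : i + 1 = e → e ≠ (q + 1) * 8 := by
            intro h1 h2
            exact h7 ((pv_mod7_iff q s i hqs (by omega) (by omega)).mpr (by omega))
          obtain ⟨row', hr1, hr2, hr3⟩ :=
            ih (i + 1) (out ++ [PySem.Str.join "" row]) [pvToken u2m i] (n' + 1)
              (by omega) (by omega) (by omega) (by simp) hb'
          refine ⟨row', hr1, hr2, ?_⟩
          have hn : n' + 1 + (e - (i + 1)) = n' + (e - i) := by omega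
          rw [← hn]
          rw [show (⟨B0 ++ out ++ [PySem.Str.join "" row], [pvToken u2m i], n' + 1⟩ : PvBuilder)
              = ⟨B0 ++ (out ++ [PySem.Str.join "" row]), [pvToken u2m i], n' + 1⟩ from by simp]
          exact hr3
      · -- token appended to the current row
        have hws : pvWrapStep (out, PySem.Str.join "" row) (pvToken u2m i)
            = (out, PySem.Str.join "" (row ++ [pvToken u2m i])) := by
          unfold pvWrapStep
          rw [if_neg hm, pv_join_append]
        rw [hws]
        simp only [if_neg hm]
        by_cases h7 : PySem.Int.mod i 8 = 7
        · have he8 : i + 1 = (q + 1) * 8 := (pv_mod7_iff q s i hqs (by omega) (by omega)).mp h7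
          have hee : e = i + 1 := by omega
          rw [if_pos h7, pv_flush_ne _ _ _ (by simp)]
          subst hee
          refine ⟨row ++ [pvToken u2m i], by simp, ?_, ?_⟩
          · rw [PySem.List.pyRange_one_eq_nil (le_refl _)]; rfl
          · rw [PySem.List.pyRange_one_eq_nil (le_refl _), if_pos he8]
            have hn : n' + (i + 1 - i) = n' + 1 := by omega
            rw [hn]
            simp
        · rw [if_neg h7]
          have hb' : i + 1 = e → e ≠ (q + 1) * 8 := by
            intro h1 h2
            exact h7 ((pv_mod7_iff q s i hqs (by omega) (by omega)).mpr (by omega))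
          obtain ⟨row', hr1, hr2, hr3⟩ :=
            ih (i + 1) out (row ++ [pvToken u2m i]) (n' + 1)
              (by omega) (by omega) (by omega) (by simp) hb'
          refine ⟨row', hr1, hr2, ?_⟩
          have hn : n' + 1 + (e - (i + 1)) = n' + (e - i) := by omega
          rw [← hn]
          exact hr3

-- the main loop: A's full stream from an empty row equals B's block recursion
lemma pv_main (u2m : List (Int × Int)) (ucto : Int) :
    ∀ (m : Nat) (s : Int) (R : List String) (n : Int),
      (ucto - s).toNat ≤ m → s < ucto →
      (pvA_flush ((PySem.List.pyRange s ucto 1).foldl (pvA_step u2m) ⟨R, [], n⟩)).rows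
          = R ++ pvB_blocks u2m s ucto ∧
      ((PySem.List.pyRange s ucto 1).foldl (pvA_step u2m) ⟨R, [], n⟩).nitems
          = n + (ucto - s) := by
  intro m
  induction m with
  | zero => intro s R n hm hs; omega
  | succ m ih =>
    intro s R n hm hs
    obtain ⟨hq1, hq2⟩ := pv_fd s
    set q := PySem.Int.floordiv s 8 with hqdef
    set e := min ucto ((q + 1) * 8) with hedef
    have hse : s < e := by omega
    have heu : e ≤ ucto := by omega
    have hqe : e ≤ (q + 1) * 8 := by omega
    have hB : pvB_blocks u2m s ucto =
        pvCmt s ++ pvWrap ((PySem.List.pyRange s e 1).map (pvToken u2m))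
          ++ pvB_blocks u2m e ucto := by
      rw [pvB_blocks]
      simp only [hs, dite_true, dif_pos]
      rw [← hqdef, ← hedef]
    rw [PySem.List.pyRange_one_cons hs]
    simp only [List.foldl_cons]
    rw [pv_step_start]
    by_cases h7 : PySem.Int.mod s 8 = 7
    · -- block of size one: s ≡ 7 (mod 8), e = s + 1
      have he8 : s + 1 = (q + 1) * 8 := (pv_mod7_iff q s s hq1 (le_refl _) hq2).mp h7
      have hee : e = s + 1 := by omega
      have hW : pvWrap ((PySem.List.pyRange s e 1).map (pvToken u2m)) = [pvToken u2m s] := by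
        rw [hee, PySem.List.pyRange_one_singleton]
        rfl
      rw [if_pos h7, hB, hW]
      by_cases hcont : s + 1 < ucto
      · obtain ⟨ha, hb⟩ := ih (s + 1) (R ++ pvCmt s ++ [pvToken u2m s]) (n + 1) (by omega) hcont
        rw [hee]
        refine ⟨?_, by omega⟩
        rw [ha]
        simp
      · have hend : ucto = s + 1 := by omega
        have hBe : pvB_blocks u2m e ucto = [] := by
          rw [pvB_blocks]
          simp [hee, hend]
        rw [hBe]
        rw [show PySem.List.pyRange (s + 1) ucto 1 = [] from
          PySem.List.pyRange_one_eq_nil (by omega)]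
        rw [List.foldl_nil]
        constructor
        · unfold pvA_flush
          simp
        · simp
          omega
    · -- block continues past s: run the inner wrap loop from row = [token s]
      rw [if_neg h7]
      have hb0 : s + 1 = e → e ≠ (q + 1) * 8 := by
        intro h1 h2
        exact h7 ((pv_mod7_iff q s s hq1 (le_refl _) hq2).mpr (by omega))
      obtain ⟨row', hr1, hr2, hr3⟩ :=
        pv_inner u2m ucto q e (R ++ pvCmt s) s hq1 hqe heu
          ((e - (s + 1)).toNat) (s + 1) [] [pvToken u2m s] (n + 1)
          (by omega) (by omega) (le_refl _) (by simp) hb0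
      rw [show (⟨R ++ pvCmt s, [pvToken u2m s], n + 1⟩ : PvBuilder)
          = ⟨(R ++ pvCmt s) ++ [], [pvToken u2m s], n + 1⟩ from by simp] at *
      rw [hr3]
      have hW : pvWrap ((PySem.List.pyRange s e 1).map (pvToken u2m)) =
          (((PySem.List.pyRange (s + 1) e 1).map (pvToken u2m)).foldl pvWrapStep
            ([], PySem.Str.join "" [pvToken u2m s])).1
          ++ [(((PySem.List.pyRange (s + 1) e 1).map (pvToken u2m)).foldl pvWrapStep
            ([], PySem.Str.join "" [pvToken u2m s])).2] := by
        rw [PySem.List.pyRange_one_cons hse, List.map_cons, pv_join_singleton]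
        rfl
      set P := ((PySem.List.pyRange (s + 1) e 1).map (pvToken u2m)).foldl pvWrapStep
          ([], PySem.Str.join "" [pvToken u2m s]) with hPdef
      by_cases he8 : e = (q + 1) * 8
      · rw [if_pos he8]
        by_cases hcont : e < ucto
        · obtain ⟨ha, hb⟩ := ih e ((R ++ pvCmt s) ++ P.1 ++ [P.2]) (n + 1 + (e - (s + 1)))
            (by omega) hcont
          refine ⟨?_, by omega⟩
          rw [ha, hB, hW]
          simp
        · have hend : ucto = e := by omega
          rw [show PySem.List.pyRange e ucto 1 = [] from
            PySem.List.pyRange_one_eq_nil (by omega), List.foldl_nil]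
          have hBe : pvB_blocks u2m e ucto = [] := by
            rw [pvB_blocks]
            simp [hend]
          constructor
          · unfold pvA_flush
            simp [hB, hW, hBe]
          · simp
            omega
      · -- partial final block: e = ucto and the pending row is flushed by joinRows
        rw [if_neg he8]
        have hend : ucto = e := by omega
        rw [show PySem.List.pyRange e ucto 1 = [] from
          PySem.List.pyRange_one_eq_nil (by omega), List.foldl_nil]
        have hBe : pvB_blocks u2m e ucto = [] := by
          rw [pvB_blocks]
          simp [hend]
        constructor
        · rw [pv_flush_ne _ _ _ hr1]
          simp [hB, hW, hBe, hr2]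
        · simp
          omega

-- ===== VERDICT (by name: the statement is the Claim_ definition above) =====
theorem table_unicode_to_singlebyte_spec : Claim_equal_table_unicode_to_singlebyte := by
  intro codec u2m ucfrom ucto _hdom hpre
  unfold Spec_table_unicode_to_singlebyte
  unfold table_unicode_to_singlebyte table_unicode_to_singlebyte_alt pvA_joinRows
  dsimp only
  obtain ⟨ha, hb⟩ := pv_main u2m ucto ((ucto - ucfrom).toNat) ucfrom [] 0 (le_refl _) hpre
  rw [List.nil_append] at ha
  rw [ha, hb]
  have hn : 0 + (ucto - ucfrom) = ucto - ucfrom := by omega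
  rw [hn]
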